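-- pv_equiv track=rewrite | github.com/kimheekimhee/TIL | python/programmers/부족한 금액 계산하기.py | solution
-- ===== SOURCE A (Python) =====
-- def solution(price, money, count):
--     answer = 0
--     real_price = 0
--     for i in range(1, count+1):
--         real_price += i*price
--     answer = real_price - money
--     if answer < 0:
--         answer = 0
--     return answer
-- ===== SOURCE B (Python) =====
-- def solution(price, money, count):
--     n = count if count > 0 else 0
--     return max(0, price * n * (n + 1) // 2 - money)
-- ===== Notes on version B (the rewrite author's own statement) =====
-- stated objective: faster
-- what changed: Replaces the O(count) accumulation loop by the closed-form triangular-number formula price*n*(n+1)//2 with max for the clamp.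
import Mathlib
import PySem

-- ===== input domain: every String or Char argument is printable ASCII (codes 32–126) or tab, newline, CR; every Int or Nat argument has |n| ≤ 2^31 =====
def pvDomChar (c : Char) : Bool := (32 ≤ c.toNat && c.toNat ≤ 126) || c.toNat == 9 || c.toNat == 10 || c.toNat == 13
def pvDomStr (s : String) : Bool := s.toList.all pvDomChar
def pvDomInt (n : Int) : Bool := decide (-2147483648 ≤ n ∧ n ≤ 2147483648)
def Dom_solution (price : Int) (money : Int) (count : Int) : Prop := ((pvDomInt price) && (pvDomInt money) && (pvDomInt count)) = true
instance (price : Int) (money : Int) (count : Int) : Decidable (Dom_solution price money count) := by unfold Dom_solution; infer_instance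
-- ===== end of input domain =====

-- B replaces A's O(count) accumulation loop by the closed-form triangular sum price*n*(n+1)//2 (faster, asymptotic).


-- ===== PORT A =====
def solution (price : Int) (money : Int) (count : Int) : Int :=
  let real_price := (PySem.List.pyRange 1 (count + 1) 1).foldl (fun rp i => rp + i * price) 0
  let answer := real_price - money
  if answer < 0 then 0 else answer

-- ===== PORT B =====
def solution_alt (price : Int) (money : Int) (count : Int) : Int :=
  let n := if count > 0 then count else 0
  max 0 (PySem.Int.floordiv (price * n * (n + 1)) 2 - money)

-- ===== PRECONDITION & SPEC =====
def Spec_solution (price : Int) (money : Int) (count : Int) (out : Int) : Prop := out = solution_alt price money count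
instance (price : Int) (money : Int) (count : Int) (out : Int) : Decidable (Spec_solution price money count out) := by unfold Spec_solution; infer_instance

-- ===== CLAIM (what is proved, stated in full; the proofs are below) =====
def Claim_equal_solution : Prop := ∀ (price : Int) (money : Int) (count : Int), Dom_solution price money count → Spec_solution price money count (solution price money count)

-- ===== LEMMAS AND PROOFS =====

theorem pv_sum_loop (price : Int) (n : Nat) :
    2 * (PySem.List.pyRange 1 ((n : Int) + 1) 1).foldl (fun rp i => rp + i * price) 0
      = price * (n : Int) * ((n : Int) + 1) := by
  induction n with
  | zero => simp
  | succ m ih =>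
    have h : PySem.List.pyRange 1 ((m : Int) + 1 + 1) 1
        = PySem.List.pyRange 1 ((m : Int) + 1) 1 ++ [(m : Int) + 1] :=
      PySem.List.pyRange_one_succ_right (by omega)
    push_cast
    rw [h, List.foldl_append]
    simp only [List.foldl]
    push_cast at ih
    linarith [ih]

theorem pv_max_eq (x : Int) : max 0 x = if x < 0 then 0 else x := by
  rcases lt_or_ge x 0 with h | h <;> simp [h, le_of_lt]

theorem solution_eq (price money count : Int) :
    solution price money count = solution_alt price money count := by
  unfold solution solution_alt
  by_cases h : count ≤ 0
  · have hr : PySem.List.pyRange 1 (count + 1) 1 = [] :=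
      PySem.List.pyRange_one_eq_nil (by omega)
    simp [hr, if_neg (by omega : ¬ count > 0), PySem.Int.floordiv, pv_max_eq]
  · have h : 0 < count := by omega
    obtain ⟨n, rfl⟩ : ∃ n : Nat, count = (n : Int) := ⟨count.toNat, by omega⟩
    have hs := pv_sum_loop price n
    have hfd : PySem.Int.floordiv (price * (n : Int) * ((n : Int) + 1)) 2
        = (PySem.List.pyRange 1 ((n : Int) + 1) 1).foldl (fun rp i => rp + i * price) 0 := by
      rw [PySem.Int.floordiv_eq_ediv_of_pos (by norm_num), ← hs]
      exact Int.mul_ediv_cancel_left _ (by norm_num)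
    simp only [if_pos h, hfd, pv_max_eq]

-- ===== VERDICT (by name: the statement is the Claim_ definition above) =====
theorem solution_spec : Claim_equal_solution := by
  intro price money count _
  exact solution_eq price money count
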